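-- pv_equiv track=rewrite | github.com/romanradice/PyDameAI | Dame/dame.py | partie_fini
-- ===== SOURCE A (Python) =====
-- def partie_fini(plateau):
--     score_b = 0
--     score_n = 0
--     for i in range(len(plateau)):
--         for j in range(len(plateau)):
--             if plateau[i][j] > 0 :
--                 score_b += plateau[i][j]
--             elif plateau[i][j] < 0:
--                 score_n += plateau[i][j]
--     return score_n == 0 or score_b == 0
-- ===== SOURCE B (Python) =====
-- def partie_fini(plateau):
--     n = len(plateau)
--     cells = [row[j] for row in plateau for j in range(n)]
--     return not any(c < 0 for c in cells) or not any(c > 0 for c in cells)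
-- ===== Notes on version B (the rewrite author's own statement) =====
-- stated objective: idiomatic
-- what changed: B replaces the two running score sums over nested index ranges by building the board's flattened n-by-n cell list once and asking two existence questions with any(): the game is over iff no negative cell exists or no positive cell exists.
import Mathlib
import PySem

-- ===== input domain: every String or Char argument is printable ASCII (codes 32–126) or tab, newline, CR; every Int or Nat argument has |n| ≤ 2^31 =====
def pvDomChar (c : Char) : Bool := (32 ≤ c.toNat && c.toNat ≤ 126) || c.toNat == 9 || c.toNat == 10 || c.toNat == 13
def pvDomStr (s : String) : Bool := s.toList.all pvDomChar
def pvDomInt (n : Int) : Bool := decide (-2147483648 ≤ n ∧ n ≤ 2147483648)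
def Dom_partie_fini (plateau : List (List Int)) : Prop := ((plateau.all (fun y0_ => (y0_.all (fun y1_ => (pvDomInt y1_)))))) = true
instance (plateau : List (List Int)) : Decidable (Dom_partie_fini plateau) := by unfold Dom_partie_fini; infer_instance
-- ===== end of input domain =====

-- B replaces the two running score sums over nested index ranges by two short-circuiting
-- existence scans over the flattened n×n board cells.

-- ===== PORT A =====
def partie_fini (plateau : List (List Int)) : Bool :=
  let n : Int := plateau.length
  let st :=
    (PySem.List.pyRange 0 n 1).foldl (fun (s : Int × Int) i =>
      (PySem.List.pyRange 0 n 1).foldl (fun (s : Int × Int) j =>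
        let c := PySem.List.pyGetD (PySem.List.pyGetD plateau i []) j 0
        if c > 0 then (s.1 + c, s.2)
        else if c < 0 then (s.1, s.2 + c)
        else s) s) ((0 : Int), (0 : Int))
  decide (st.2 = 0) || decide (st.1 = 0)

-- ===== PORT B =====
def partie_fini_alt (plateau : List (List Int)) : Bool :=
  let n : Int := plateau.length
  let cells := plateau.flatMap (fun row =>
    (PySem.List.pyRange 0 n 1).map (fun j => PySem.List.pyGetD row j 0))
  (!cells.any (fun c => decide (c < 0))) || (!cells.any (fun c => decide (c > 0)))

-- ===== PRECONDITION & SPEC =====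
-- Exactly A's return domain: A raises IndexError iff some row is shorter than the board
-- (j ranges over range(len(plateau)) in every row).
def Pre_partie_fini (plateau : List (List Int)) : Prop :=
  ∀ row ∈ plateau, plateau.length ≤ row.length
instance (plateau : List (List Int)) : Decidable (Pre_partie_fini plateau) := by
  unfold Pre_partie_fini; infer_instance
def pvWitness_partie_fini : List (List Int) := [[1, -1], [0, 2]]

def Spec_partie_fini (plateau : List (List Int)) (out : Bool) : Prop := out = partie_fini_alt plateau
instance (plateau : List (List Int)) (out : Bool) : Decidable (Spec_partie_fini plateau out) := by unfold Spec_partie_fini; infer_instance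

-- ===== CLAIM (what is proved, stated in full; the proofs are below) =====
def Claim_equal_partie_fini : Prop := ∀ (plateau : List (List Int)), Dom_partie_fini plateau → Pre_partie_fini plateau → Spec_partie_fini plateau (partie_fini plateau)

-- ===== LEMMAS AND PROOFS =====

-- a bounded index loop 'for j in range(n): … xs[j] …' with n ≤ len xs reads xs.take n
theorem foldl_pyRange_take {β : Type} (xs : List Int) (n : Nat) (h : n ≤ xs.length)
    (f : β → Int → β) (init : β) :
    (PySem.List.pyRange 0 (n : Int) 1).foldl
        (fun acc j => f acc (PySem.List.pyGetD xs j 0)) init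
      = (xs.take n).foldl f init := by
  have hlen : ((xs.take n).length : Int) = (n : Int) := by
    simp [List.length_take, Nat.min_eq_left h]
  have hcg : (PySem.List.pyRange 0 (n : Int) 1).foldl
        (fun acc j => f acc (PySem.List.pyGetD xs j 0)) init
      = (PySem.List.pyRange 0 (n : Int) 1).foldl
        (fun acc j => f acc (PySem.List.pyGetD (xs.take n) j 0)) init := by
    apply PySem.List.foldl_congr_mem
    intro acc j hj
    have hj' := (PySem.List.mem_pyRange_one).mp hj
    have h0 : 0 ≤ j := hj'.1
    have hjn : j < (n : Int) := hj'.2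
    have hjx : j < (xs.length : Int) := by omega
    have hjt : j < ((xs.take n).length : Int) := by omega
    rw [PySem.List.pyGetD_eq_getElem xs 0 h0 hjx,
        PySem.List.pyGetD_eq_getElem (xs.take n) 0 h0 hjt]
    congr 1
    rw [List.getElem_take]
  rw [hcg, ← hlen, PySem.List.foldl_pyRange_zero_pyGetD' (xs.take n) 0 f init]

-- the cells a bounded index comprehension '[xs[j] for j in range(n)]' reads, n ≤ len xs
theorem map_pyRange_take (xs : List Int) (n : Nat) (h : n ≤ xs.length) :
    (PySem.List.pyRange 0 (n : Int) 1).map (fun j => PySem.List.pyGetD xs j 0)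
      = xs.take n := by
  have hlen : ((xs.take n).length : Int) = (n : Int) := by
    simp [List.length_take, Nat.min_eq_left h]
  have hcg : (PySem.List.pyRange 0 (n : Int) 1).map (fun j => PySem.List.pyGetD xs j 0)
      = (PySem.List.pyRange 0 (n : Int) 1).map (fun j => PySem.List.pyGetD (xs.take n) j 0) := by
    apply List.map_congr_left
    intro j hj
    have hj' := (PySem.List.mem_pyRange_one).mp hj
    have h0 : 0 ≤ j := hj'.1
    have hjn : j < (n : Int) := hj'.2
    have hjx : j < (xs.length : Int) := by omega
    have hjt : j < ((xs.take n).length : Int) := by omega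
    rw [PySem.List.pyGetD_eq_getElem xs 0 h0 hjx,
        PySem.List.pyGetD_eq_getElem (xs.take n) 0 h0 hjt]
    rw [List.getElem_take]
  rw [hcg, ← hlen, PySem.List.map_pyGetD_pyRange_zero' (xs.take n) 0]

-- one row's contribution to (score_b, score_n)
theorem row_fold (row : List Int) (s : Int × Int) :
    row.foldl (fun (s : Int × Int) c =>
        if c > 0 then (s.1 + c, s.2) else if c < 0 then (s.1, s.2 + c) else s) s
      = (s.1 + ((row.filter (fun c => decide (0 < c))).sum),
         s.2 + ((row.filter (fun c => decide (c < 0))).sum)) := by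
  induction row generalizing s with
  | nil => simp
  | cons c t ih =>
      simp only [List.foldl_cons, List.filter_cons]
      by_cases h1 : 0 < c
      · simp [h1, Int.not_lt.mpr (le_of_lt h1), ih, add_assoc]
      · by_cases h2 : c < 0
        · simp [h1, h2, ih, add_assoc]
        · simp [h1, h2, ih]

theorem pos_sum_zero (l : List Int) :
    ((l.filter (fun c => decide (0 < c))).sum = 0) ↔ (l.any (fun c => decide (0 < c)) = false) := by
  induction l with
  | nil => simp
  | cons c t ih =>
      simp only [List.filter_cons, List.any_cons]
      by_cases h : 0 < c
      · constructor
        · intro hs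
          exfalso
          have hge : 0 ≤ (t.filter (fun c => decide (0 < c))).sum := by
            apply List.sum_nonneg
            intro x hx
            have := (List.mem_filter.mp hx).2
            simpa using le_of_lt (of_decide_eq_true this)
          simp [h] at hs; omega
        · intro hb; simp [h] at hb
      · simp [h, ih]

theorem filt_neg_nonpos (t : List Int) : ((t.filter (fun c => decide (c < 0))).sum ≤ 0) := by
  induction t with
  | nil => simp
  | cons c r ih =>
      simp only [List.filter_cons]
      by_cases h : c < 0
      · rw [if_pos (by simpa using h)]
        simp only [List.sum_cons]; omega
      · simp [h, ih]

theorem neg_sum_zero (l : List Int) :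
    ((l.filter (fun c => decide (c < 0))).sum = 0) ↔ (l.any (fun c => decide (c < 0)) = false) := by
  induction l with
  | nil => simp
  | cons c t ih =>
      simp only [List.filter_cons, List.any_cons]
      by_cases h : c < 0
      · constructor
        · intro hs
          exfalso
          have hle := filt_neg_nonpos t
          simp [h] at hs; omega
        · intro hb; simp [h] at hb
      · simp [h, ih]

theorem board_fold (plateau : List (List Int)) (m : Nat) (s : Int × Int) :
    plateau.foldl (fun (s : Int × Int) row =>
        (s.1 + (((row.take m).filter (fun c => decide (0 < c))).sum),
         s.2 + (((row.take m).filter (fun c => decide (c < 0))).sum))) s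
      = (s.1 + (((plateau.flatMap (fun row => row.take m)).filter (fun c => decide (0 < c))).sum),
         s.2 + (((plateau.flatMap (fun row => row.take m)).filter (fun c => decide (c < 0))).sum)) := by
  induction plateau generalizing s with
  | nil => simp
  | cons r t ih => simp [ih, add_assoc]

-- ===== VERDICT (by name: the statement is the Claim_ definition above) =====
theorem partie_fini_spec : Claim_equal_partie_fini := by
  intro plateau _ hpre
  unfold Spec_partie_fini partie_fini partie_fini_alt
  simp only []
  have houter :
      (PySem.List.pyRange 0 (plateau.length : Int) 1).foldl (fun (s : Int × Int) i =>
        (PySem.List.pyRange 0 (plateau.length : Int) 1).foldl (fun (s : Int × Int) j =>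
          let c := PySem.List.pyGetD (PySem.List.pyGetD plateau i []) j 0
          if c > 0 then (s.1 + c, s.2) else if c < 0 then (s.1, s.2 + c) else s) s)
        ((0 : Int), (0 : Int))
      = plateau.foldl (fun (s : Int × Int) row =>
          (s.1 + (((row.take plateau.length).filter (fun c => decide (0 < c))).sum),
           s.2 + (((row.take plateau.length).filter (fun c => decide (c < 0))).sum))) ((0 : Int), (0 : Int)) := by
    rw [PySem.List.foldl_pyRange_zero_pyGetD' plateau []
      (fun (s : Int × Int) row =>
        (PySem.List.pyRange 0 (plateau.length : Int) 1).foldl (fun (s : Int × Int) j =>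
          let c := PySem.List.pyGetD row j 0
          if c > 0 then (s.1 + c, s.2) else if c < 0 then (s.1, s.2 + c) else s) s)
      ((0 : Int), (0 : Int))]
    apply PySem.List.foldl_congr_mem
    intro s row hrow
    rw [foldl_pyRange_take row plateau.length (hpre row hrow)
      (fun (s : Int × Int) c =>
        if c > 0 then (s.1 + c, s.2) else if c < 0 then (s.1, s.2 + c) else s) s]
    exact row_fold (row.take plateau.length) s
  have hcells : plateau.flatMap (fun row =>
      (PySem.List.pyRange 0 (plateau.length : Int) 1).map (fun j => PySem.List.pyGetD row j 0))
      = plateau.flatMap (fun row => row.take plateau.length) := by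
    apply List.flatMap_congr
    intro row hrow
    exact map_pyRange_take row plateau.length (hpre row hrow)
  rw [houter, board_fold plateau plateau.length, hcells]
  simp only [zero_add]
  rw [Bool.eq_iff_iff]
  simp only [Bool.or_eq_true, decide_eq_true_eq, Bool.not_eq_true', gt_iff_lt]
  rw [pos_sum_zero, neg_sum_zero]
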